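-- pv_equiv track=rewrite | github.com/JollyRogerTrader/Regowal | regowal.py | most_prominent
-- ===== SOURCE A (Python) =====
-- def most_prominent(colorlist):
--     dict = {}
--     top_count = 0
--     top_colors = []
--     for item in colorlist:
--         dict[item] = dict.get(item, 0) + 1
--         if dict[item] > top_count:
--             top_count = dict[item]
--     for key, value in sorted(dict.items(), key=lambda item: item[1], reverse=True):
--         top_colors.append(key)
--     return top_colors
-- ===== SOURCE B (Python) =====
-- def most_prominent(colorlist):
--     counts = {}
--     for item in colorlist:
--         counts[item] = counts.get(item, 0) + 1
--     max_count = max(counts.values(), default=0)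
--     buckets = [[] for _ in range(max_count + 1)]
--     for key, value in counts.items():
--         buckets[value].append(key)
--     top_colors = []
--     for count in range(max_count, 0, -1):
--         top_colors.extend(buckets[count])
--     return top_colors
-- ===== Notes on version B (the rewrite author's own statement) =====
-- stated objective: alternative
-- what changed: Replaces A's comparison sort of the frequency-dict items by a bucket/counting sort: keys are appended to buckets indexed by their count and the buckets are read out from the maximum count down, preserving first-occurrence tie order.
import Mathlib
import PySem

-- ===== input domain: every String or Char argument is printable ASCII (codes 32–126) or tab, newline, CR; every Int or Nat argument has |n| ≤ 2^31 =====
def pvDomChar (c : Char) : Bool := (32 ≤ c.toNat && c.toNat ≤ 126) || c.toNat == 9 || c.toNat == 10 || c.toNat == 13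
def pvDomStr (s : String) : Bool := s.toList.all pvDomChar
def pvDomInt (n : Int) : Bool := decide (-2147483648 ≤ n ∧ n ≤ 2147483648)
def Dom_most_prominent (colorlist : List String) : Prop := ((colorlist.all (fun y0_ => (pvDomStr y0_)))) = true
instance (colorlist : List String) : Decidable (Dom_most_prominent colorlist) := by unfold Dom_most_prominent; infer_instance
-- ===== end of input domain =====

-- B replaces A's comparison sort of the frequency dict by a bucket/counting pass
-- over counts (max count down to 1), preserving first-occurrence tie order; objective: alternative algorithm.

-- ===== PORT A =====
def most_prominent (colorlist : List String) : List String :=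
  let st := colorlist.foldl
    (fun (st : PySem.Dict String Int × Int) item =>
      let d := st.1.insert item (st.1.getD item 0 + 1)
      (d, if d.getD item 0 > st.2 then d.getD item 0 else st.2))
    (PySem.Dict.empty, (0 : Int))
  (PySem.List.sorted st.1.items (fun it => it.2) true).foldl
    (fun acc kv => acc ++ [kv.1]) []

-- ===== PORT B =====
def most_prominent_alt (colorlist : List String) : List String :=
  let counts := colorlist.foldl
    (fun (d : PySem.Dict String Int) item => d.insert item (d.getD item 0 + 1))
    PySem.Dict.empty
  let max_count : Int := (PySem.List.max? counts.values (fun v => v)).getD 0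
  let buckets0 : List (List String) := (PySem.List.pyRange 0 (max_count + 1) 1).map (fun _ => [])
  let buckets := counts.items.foldl
    (fun bs kv => PySem.List.pySetD bs kv.2 (PySem.List.pyGetD bs kv.2 [] ++ [kv.1]))
    buckets0
  (PySem.List.pyRange max_count 0 (-1)).foldl
    (fun acc c => acc ++ PySem.List.pyGetD buckets c []) []

-- ===== PRECONDITION & SPEC =====
def Spec_most_prominent (colorlist : List String) (out : List String) : Prop := out = most_prominent_alt colorlist
instance (colorlist : List String) (out : List String) : Decidable (Spec_most_prominent colorlist out) := by unfold Spec_most_prominent; infer_instance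

-- ===== CLAIM (what is proved, stated in full; the proofs are below) =====
def Claim_equal_most_prominent : Prop := ∀ (colorlist : List String), Dom_most_prominent colorlist → Spec_most_prominent colorlist (most_prominent colorlist)

-- ===== LEMMAS AND PROOFS =====

-- the first component of A's (dict, top_count) fold is exactly B's dict fold
theorem pvFstFold (xs : List String) :
    ∀ (st : PySem.Dict String Int × Int),
      (xs.foldl
        (fun (st : PySem.Dict String Int × Int) item =>
          let d := st.1.insert item (st.1.getD item 0 + 1)
          (d, if d.getD item 0 > st.2 then d.getD item 0 else st.2)) st).1
      = xs.foldl (fun (d : PySem.Dict String Int) item => d.insert item (d.getD item 0 + 1)) st.1 := by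
  induction xs with
  | nil => intro st; rfl
  | cons x t ih => intro st; simpa using ih _

-- insertBy passes over a prefix it is not inserted before
theorem pvInsertskip {α : Type} (before : α → α → Bool) (x : α) :
    ∀ (L M : List α), (∀ y ∈ L, before x y = false) →
      PySem.List.insertBy before x (L ++ M) = L ++ PySem.List.insertBy before x M := by
  intro L
  induction L with
  | nil => intro M _; rfl
  | cons y t ih =>
    intro M h
    have hy : before x y = false := h y (by simp)
    simp only [List.cons_append, PySem.List.insertBy, hy]
    simp [ih M (fun z hz => h z (by simp [hz]))]

-- insertBy goes in front of a list it precedes entirely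
theorem pvInsertFront {α : Type} (before : α → α → Bool) (x : α) :
    ∀ (M : List α), (∀ y ∈ M, before x y = true) →
      PySem.List.insertBy before x M = x :: M := by
  intro M h
  cases M with
  | nil => rfl
  | cons y t => simp [PySem.List.insertBy, h y (by simp)]

-- inserting x into descending key-buckets of t appends it to its own bucket
theorem pvInsertBuckets {α : Type} (key : α → Int) (x : α) (t : List α) :
    ∀ (cs : List Int), cs.Pairwise (· > ·) → key x ∈ cs →
      PySem.List.insertBy (fun a b => decide (key b < key a)) x
        (cs.flatMap (fun c => t.filter (fun z => decide (key z = c))))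
      = cs.flatMap (fun c => (t ++ [x]).filter (fun z => decide (key z = c))) := by
  intro cs
  induction cs with
  | nil => intro _ hx; simp at hx
  | cons c cs' ih =>
    intro hpw hx
    have hlt : ∀ c' ∈ cs', c' < c := (List.pairwise_cons.mp hpw).1
    have hpw' : cs'.Pairwise (· > ·) := (List.pairwise_cons.mp hpw).2
    have hskip : ∀ y ∈ t.filter (fun z => decide (key z = c)),
        (fun a b => decide (key b < key a)) x y = false := by
      intro y hy
      have hyk : key y = c := by
        have := (List.mem_filter.mp hy).2; simpa using this
      have hxle : key x ≤ c := by
        rcases List.mem_cons.mp hx with h | h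
        · omega
        · have := hlt _ h; omega
      simp [hyk]; omega
    rw [List.flatMap_cons, List.flatMap_cons,
      pvInsertskip _ x _ _ hskip]
    by_cases hxc : key x = c
    · have hfront : PySem.List.insertBy (fun a b => decide (key b < key a)) x
          (cs'.flatMap (fun c => t.filter (fun z => decide (key z = c))))
          = x :: cs'.flatMap (fun c => t.filter (fun z => decide (key z = c))) := by
        apply pvInsertFront
        intro y hy
        rcases List.mem_flatMap.mp hy with ⟨c', hc', hyf⟩
        have hyk : key y = c' := by
          have := (List.mem_filter.mp hyf).2; simpa using this
        have := hlt _ hc'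
        simp [hyk, hxc]; omega
      rw [hfront]
      have htail : cs'.flatMap (fun c => (t ++ [x]).filter (fun z => decide (key z = c)))
          = cs'.flatMap (fun c => t.filter (fun z => decide (key z = c))) := by
        apply List.flatMap_congr
        intro c' hc'
        have := hlt _ hc'
        simp [List.filter_append]
        intro h; omega
      rw [htail]
      have hhead : (t ++ [x]).filter (fun z => decide (key z = c))
          = t.filter (fun z => decide (key z = c)) ++ [x] := by
        simp [List.filter_append, hxc]
      rw [hhead]
      simp
    · have hx' : key x ∈ cs' := by
        rcases List.mem_cons.mp hx with h | h
        · exact absurd h hxc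
        · exact h
      rw [ih hpw' hx']
      have hhead : (t ++ [x]).filter (fun z => decide (key z = c))
          = t.filter (fun z => decide (key z = c)) := by
        simp [List.filter_append, hxc]
      rw [hhead]

-- stable reverse sort by an Int key = concatenation of the key-buckets, keys descending
theorem pvSortedFlatMap {α : Type} (key : α → Int) :
    ∀ (xs : List α) (cs : List Int), cs.Pairwise (· > ·) → (∀ x ∈ xs, key x ∈ cs) →
      PySem.List.sorted xs key true
        = cs.flatMap (fun c => xs.filter (fun x => decide (key x = c))) := by
  intro xs
  induction xs using List.reverseRecOn with
  | nil =>
    intro cs _ _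
    rw [show PySem.List.sorted ([] : List α) key true = [] from rfl]
    simp
  | append_singleton t x ih =>
    intro cs hpw hmem
    rw [PySem.List.sorted_rev_eq_foldl_insertBy, List.foldl_append, List.foldl_cons, List.foldl_nil,
      ← PySem.List.sorted_rev_eq_foldl_insertBy t key,
      ih cs hpw (fun z hz => hmem z (by simp [hz]))]
    exact pvInsertBuckets key x t cs hpw (hmem x (by simp))

-- the bucket-filling fold: final bucket c holds, in order, the first components of the items with value c
theorem pvFillGet :
    ∀ (its : List (String × Int)) (bs : List (List String)) (c : Int),
      (∀ kv ∈ its, 0 ≤ kv.2 ∧ kv.2 < (bs.length : Int)) →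
      0 ≤ c → c < (bs.length : Int) →
      PySem.List.pyGetD
        (its.foldl (fun bs kv => PySem.List.pySetD bs kv.2 (PySem.List.pyGetD bs kv.2 [] ++ [kv.1])) bs)
        c []
      = PySem.List.pyGetD bs c [] ++ (its.filter (fun kv => decide (kv.2 = c))).map (·.1) := by
  intro its
  induction its with
  | nil => intro bs c _ _ _; simp
  | cons kv rest ih =>
    intro bs c hb hc0 hc1
    obtain ⟨hk0, hk1⟩ := hb kv (by simp)
    have hlen : (PySem.List.pySetD bs kv.2 (PySem.List.pyGetD bs kv.2 [] ++ [kv.1])).length = bs.length :=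
      PySem.List.length_pySetD ..
    rw [List.foldl_cons, ih _ c (by intro kv' h'; rw [hlen]; exact hb kv' (by simp [h'])) hc0 (by rw [hlen]; exact hc1)]
    have hks : kv.2 = ((kv.2.toNat : Nat) : Int) := by omega
    have hcs : c = ((c.toNat : Nat) : Int) := by omega
    rw [hks, hcs, PySem.List.pyGetD_pySetD_natCast bs kv.2.toNat c.toNat _ _ (by omega)]
    by_cases h : c = kv.2
    · have : c.toNat = kv.2.toNat := by omega
      simp [this, ← hks, h.symm]
    · have : ¬ (c.toNat = kv.2.toNat) := by omega
      have h' : ¬ (kv.2 = c) := fun he => h he.symm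
      simp [this, ← hcs, h']

-- every slot of the freshly built list of empty buckets reads back empty
theorem pvGetEmpty (q c : Int) :
    PySem.List.pyGetD ((PySem.List.pyRange 0 q 1).map (fun _ => ([] : List String))) c [] = [] := by
  simp only [PySem.List.pyGetD, PySem.List.pyGet?]
  cases h : PySem.List.pyIdx? ((PySem.List.pyRange 0 q 1).map (fun _ => ([] : List String))).length c with
  | none => rfl
  | some k =>
    simp only [List.getElem?_map, Option.bind]
    cases (PySem.List.pyRange 0 q 1)[k]? <;> rfl

-- every value of the counter dict is the count of a member of xs
theorem pvValues (xs : List String) :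
    ∀ v ∈ (PySem.Dict.counter xs).values, ∃ k, k ∈ xs ∧ v = (xs.count k : Int) := by
  intro v hv
  simp only [PySem.Dict.values, PySem.Dict.items_counter, List.map_map, List.mem_map] at hv
  obtain ⟨k, hk, rfl⟩ := hv
  exact ⟨k, (PySem.Set.mem_ofList _ _).mp hk, rfl⟩

theorem pvMain (xs : List String) : most_prominent xs = most_prominent_alt xs := by
  rcases xs with _ | ⟨a, t⟩
  · rfl
  · simp only [most_prominent, most_prominent_alt]
    rw [pvFstFold, PySem.Dict.foldl_insert_getD_add_one_eq_counter]
    have hvpos : ∀ v ∈ (PySem.Dict.counter (a :: t)).values, 1 ≤ v := by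
      intro v hv
      obtain ⟨k, hk, rfl⟩ := pvValues _ v hv
      exact_mod_cast List.count_pos_iff.mpr hk
    have havals : (a, ((a :: t).count a : Int)) ∈ (PySem.Dict.counter (a :: t)).items := by
      rw [PySem.Dict.items_counter]
      exact List.mem_map_of_mem ((PySem.Set.mem_ofList _ _).mpr (by simp))
    have hvne : (PySem.Dict.counter (a :: t)).values ≠ [] :=
      List.ne_nil_of_mem (List.mem_map_of_mem havals)
    cases hmx : PySem.List.max? (PySem.Dict.counter (a :: t)).values (fun v => v) with
    | none => exact absurd ((PySem.List.max?_eq_none_iff _ _).mp hmx) hvne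
    | some m =>
      simp only [Option.getD_some]
      have hmmem : m ∈ (PySem.Dict.counter (a :: t)).values := PySem.List.max?_mem hmx
      have hm1 : 1 ≤ m := hvpos m hmmem
      have hmax : ∀ v ∈ (PySem.Dict.counter (a :: t)).values, v ≤ m := by
        intro v hv; exact PySem.List.max?_isMax hmx v hv
      have hkv : ∀ kv ∈ (PySem.Dict.counter (a :: t)).items, 1 ≤ kv.2 ∧ kv.2 ≤ m := by
        intro kv hkvm
        have hv : kv.2 ∈ (PySem.Dict.counter (a :: t)).values := List.mem_map_of_mem hkvm
        exact ⟨hvpos _ hv, hmax _ hv⟩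
      have hlen0 : (((PySem.List.pyRange 0 (m + 1) 1).map
          (fun _ => ([] : List String))).length : Int) = m + 1 := by
        rw [List.length_map, PySem.List.length_pyRange_one]
        omega
      have hpw : (PySem.List.pyRange m 0 (-1)).Pairwise (· > ·) := by
        rw [PySem.List.pyRange_neg_one_eq_reverse]
        exact List.pairwise_reverse.mpr
          (by simpa using PySem.List.pairwise_lt_pyRange_one 1 (m + 1))
      have hmem : ∀ kv ∈ (PySem.Dict.counter (a :: t)).items,
          (fun (it : String × Int) => it.2) kv ∈ PySem.List.pyRange m 0 (-1) := by
        intro kv hkvm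
        obtain ⟨h1, h2⟩ := hkv kv hkvm
        exact PySem.List.mem_pyRange_neg_one.mpr
          ⟨show (0 : Int) < kv.2 by omega, show kv.2 ≤ m by omega⟩
      rw [PySem.List.foldl_append_singleton_eq_map, PySem.List.foldl_append_eq_flatMap,
        pvSortedFlatMap _ _ _ hpw hmem, List.map_flatMap, List.nil_append, List.nil_append]
      apply List.flatMap_congr
      intro c hcm
      have hc := PySem.List.mem_pyRange_neg_one.mp hcm
      rw [pvFillGet _ _ c
        (by intro kv h'; have := hkv kv h'; rw [hlen0]; omega)
        (by omega) (by omega), pvGetEmpty]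
      simp

-- ===== VERDICT (by name: the statement is the Claim_ definition above) =====
theorem most_prominent_spec : Claim_equal_most_prominent := by
  intro xs _
  unfold Spec_most_prominent
  exact pvMain xs
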